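-- pv_equiv track=rewrite | github.com/napszel/ClimbingRoutes | backend-scripts/generate_beta_index_html.py | html_escape_and_add_break_points
-- ===== SOURCE A (Python) =====
-- html_escape_table = {
--     "&": "&amp;",
--     '"': "&quot;",
--     "'": "&apos;",
--     ">": "&gt;",
--     "<": "&lt;",
-- }
--
-- break_characters = "- "
--
-- def html_escape(text):
--     return "".join(html_escape_table.get(c, c) for c in text)
--
-- def html_escape_and_add_break_points(text):
--     super_long_word = 24
--     bits = []
--     chars = ""
--     for i in range(0, len(text)):
--         if text[i] in break_characters:
--             if chars:
--                 bits += [(chars, False)]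
--                 chars = ""
--             bits += [(text[i], False)]
--         else:
--             chars += text[i]
--             if len(chars) > super_long_word:
--                 bits += [(chars, True)]
--                 chars = ""
--
--     if chars:
--         bits += [(chars, False)]
--
--     result = ""
--
--     for bit in bits:
--         result += html_escape(bit[0])
--         if bit[1]:
--             result += "&#8203;"
--
--     return result
-- ===== SOURCE B (Python) =====
-- html_escape_table = {
--     "&": "&amp;",
--     '"': "&quot;",
--     "'": "&apos;",
--     ">": "&gt;",
--     "<": "&lt;",
-- }
--
-- break_characters = "- "
--
-- def html_escape_and_add_break_points(text):
--     out = []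
--     run = 0
--     for c in text:
--         out.append(html_escape_table.get(c, c))
--         if c in break_characters:
--             run = 0
--         else:
--             run += 1
--             if run == 25:
--                 out.append("&#8203;")
--                 run = 0
--     return "".join(out)
-- ===== Notes on version B (the rewrite author's own statement) =====
-- stated objective: faster
-- what changed: Replaced A's two-pass design (accumulate an intermediate list of (substring, breakable) bits via repeated string concatenation, then render it with += on a growing result string) by a single streaming pass that keeps only an integer run counter, appends each escaped char to a list (plus '&#8203;' whenever 25 consecutive non-break chars are seen) and joins once.
import Mathlib
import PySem

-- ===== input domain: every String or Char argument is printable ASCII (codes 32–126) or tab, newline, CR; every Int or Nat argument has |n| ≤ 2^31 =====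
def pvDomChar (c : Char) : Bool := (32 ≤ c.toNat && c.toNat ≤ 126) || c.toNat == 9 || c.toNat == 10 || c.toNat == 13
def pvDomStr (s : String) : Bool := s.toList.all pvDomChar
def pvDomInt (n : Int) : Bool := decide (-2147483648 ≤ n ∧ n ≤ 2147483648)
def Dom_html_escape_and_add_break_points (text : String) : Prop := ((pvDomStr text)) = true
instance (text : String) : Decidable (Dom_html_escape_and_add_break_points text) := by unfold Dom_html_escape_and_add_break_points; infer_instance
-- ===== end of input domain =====

-- B replaces A's two passes (build a list of (substring, breakable) bits, then render it)
-- by one streaming pass with a run counter; objective: simpler.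

-- shared module context: html_escape_table and break_characters (used by both Pythons)
def escChar (c : Char) : List Char :=
  if c = '&' then "&amp;".toList
  else if c = '"' then "&quot;".toList
  else if c = '\'' then "&apos;".toList
  else if c = '>' then "&gt;".toList
  else if c = '<' then "&lt;".toList
  else [c]

def isBreak (c : Char) : Bool := c = '-' || c = ' '

def zwsp : List Char := "&#8203;".toList

-- ===== PORT A =====
-- html_escape(text) = "".join(html_escape_table.get(c, c) for c in text)
def html_escapeA (s : List Char) : List Char := s.flatMap escChar

-- the first for-loop of A, state (bits, chars)
def aLoop : List Char → List (List Char × Bool) → List Char → List (List Char × Bool) × List Char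
  | [], bits, chars => (bits, chars)
  | c :: rest, bits, chars =>
    if isBreak c then
      aLoop rest ((if chars ≠ [] then bits ++ [(chars, false)] else bits) ++ [([c], false)]) []
    else
      let chars' := chars ++ [c]
      if chars'.length > 24 then aLoop rest (bits ++ [(chars', true)]) []
      else aLoop rest bits chars'

-- the second for-loop of A (render the bits)
def renderA (bits : List (List Char × Bool)) : List Char :=
  bits.foldl (fun r b => r ++ html_escapeA b.1 ++ (if b.2 then zwsp else [])) []

def html_escape_and_add_break_points (text : String) : String :=
  let st := aLoop text.toList [] []
  let bits := if st.2 ≠ [] then st.1 ++ [(st.2, false)] else st.1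
  String.ofList (renderA bits)

-- ===== PORT B =====
def bLoop : List Char → List Char → Nat → List Char
  | [], out, _ => out
  | c :: rest, out, run =>
    let out' := out ++ escChar c
    if isBreak c then bLoop rest out' 0
    else if run + 1 = 25 then bLoop rest (out' ++ zwsp) 0
    else bLoop rest out' (run + 1)

def html_escape_and_add_break_points_alt (text : String) : String :=
  String.ofList (bLoop text.toList [] 0)

-- ===== PRECONDITION & SPEC =====
def Spec_html_escape_and_add_break_points (text : String) (out : String) : Prop := out = html_escape_and_add_break_points_alt text
instance (text : String) (out : String) : Decidable (Spec_html_escape_and_add_break_points text out) := by unfold Spec_html_escape_and_add_break_points; infer_instance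

-- ===== CLAIM (what is proved, stated in full; the proofs are below) =====
def Claim_equal_html_escape_and_add_break_points : Prop := ∀ (text : String), Dom_html_escape_and_add_break_points text → Spec_html_escape_and_add_break_points text (html_escape_and_add_break_points text)

-- ===== LEMMAS AND PROOFS =====

-- the final flush of A, applied to a loop state
def finishA (st : List (List Char × Bool) × List Char) : List Char :=
  renderA (if st.2 ≠ [] then st.1 ++ [(st.2, false)] else st.1)

theorem loop_agree (rest : List Char) (bits : List (List Char × Bool)) (chars : List Char)
    (hlen : chars.length ≤ 24) :
    finishA (aLoop rest bits chars) = bLoop rest (renderA bits ++ html_escapeA chars) chars.length := by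
  induction rest generalizing bits chars with
  | nil =>
    by_cases h : chars = [] <;>
      simp [aLoop, bLoop, finishA, h, renderA, html_escapeA]
  | cons c rest ih =>
    by_cases hb : isBreak c = true
    · simp only [aLoop, bLoop, hb, if_true]
      rw [ih _ _ (Nat.zero_le _)]
      by_cases h : chars = [] <;>
        simp [h, renderA, html_escapeA, List.append_assoc]
    · by_cases h25 : (chars ++ [c]).length > 24
      · have h24 : chars.length + 1 = 25 := by simp at h25; omega
        simp only [aLoop, bLoop, hb, Bool.false_eq_true, if_false, if_pos h25, if_pos h24]
        rw [ih _ _ (Nat.zero_le _)]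
        simp [renderA, html_escapeA, List.append_assoc]
      · have h24 : ¬ chars.length + 1 = 25 := by simp at h25; omega
        simp only [aLoop, bLoop, hb, Bool.false_eq_true, if_false, if_neg h25, if_neg h24]
        rw [ih _ _ (by simp at h25 ⊢; omega)]
        simp [html_escapeA, List.append_assoc]

-- ===== VERDICT (by name: the statement is the Claim_ definition above) =====
theorem html_escape_and_add_break_points_spec : Claim_equal_html_escape_and_add_break_points := by
  intro text _
  unfold Spec_html_escape_and_add_break_points
  have h := loop_agree text.toList [] [] (by simp)
  have h2 : html_escape_and_add_break_points text
      = String.ofList (finishA (aLoop text.toList [] [])) := rfl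
  rw [h2, h]
  rfl
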